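-- pv_equiv track=rewrite | github.com/miliar/Code_Jam_Webscraper | solutions_python/Problem_178/4225.py | rec
-- ===== SOURCE A (Python) =====
-- def rec(word):
-- 	e=0
-- 	l=word[0]
-- 	c=word[0]
-- 	for c in word:
-- 		if(c!=l):
-- 			e+=1
-- 		l=c
-- 	if(c=='-'):
-- 		e+=1
-- 	return e
-- ===== SOURCE B (Python) =====
-- def _runs(chars):
--     # recursively split into maximal runs of equal characters, keeping one char per run
--     if not chars:
--         return []
--     head = chars[0]
--     i = 1
--     while i < len(chars) and chars[i] == head:
--         i += 1
--     return [head] + _runs(chars[i:])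
--
-- def rec(word):
--     # number of runs minus one = number of adjacent character changes
--     return len(_runs(list(word))) - 1 + (1 if word[-1] == '-' else 0)
-- ===== Notes on version B (the rewrite author's own statement) =====
-- stated objective: alternative
-- what changed: Instead of a single stateful scan comparing each character with the previous one, B recursively splits the word into its maximal runs of equal characters and returns the number of runs minus one, plus one if the last character is '-'.
import Mathlib
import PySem

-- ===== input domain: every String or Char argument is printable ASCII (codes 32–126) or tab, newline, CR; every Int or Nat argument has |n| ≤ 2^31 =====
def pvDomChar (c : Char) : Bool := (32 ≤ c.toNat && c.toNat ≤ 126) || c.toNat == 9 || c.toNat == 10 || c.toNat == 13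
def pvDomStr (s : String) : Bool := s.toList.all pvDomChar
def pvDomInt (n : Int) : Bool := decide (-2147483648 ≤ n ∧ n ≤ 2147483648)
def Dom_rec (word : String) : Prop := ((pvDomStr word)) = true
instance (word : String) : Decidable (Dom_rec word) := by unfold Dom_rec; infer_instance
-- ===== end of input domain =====

-- B replaces A's stateful previous-char scan by recursively splitting the word into maximal
-- runs of equal characters and counting runs minus one (plus the trailing-dash term).

-- ===== PORT A =====
-- A's loop body: state (e, l, c); each step does 'if c != l: e += 1' then 'l = c'.
def recStepA (p : Int × Char × Char) (c : Char) : Int × Char × Char :=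
  ((if c ≠ p.2.1 then p.1 + 1 else p.1), c, c)

-- A carries state (e, l, c); l := word[0], c := word[0] before the loop.
def rec (word : String) : Int :=
  match word.toList with
  | [] => 0  -- Python raises IndexError at word[0] here; excluded by Pre_rec
  | h :: _ =>
    let st := word.toList.foldl recStepA (0, h, h)
    if st.2.2 = '-' then st.1 + 1 else st.1

-- ===== PORT B =====
-- B's _runs: keep the first char of each maximal run, recurse past the equal prefix
-- (the Python while-loop skipping equal chars is the dropWhile here).
def runSplit (l : List Char) : List Char :=
  match l with
  | [] => []
  | h :: t => h :: runSplit (t.dropWhile (fun c => c == h))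
termination_by l.length
decreasing_by
  simpa using Nat.lt_succ_of_le (List.length_dropWhile_le _ _)

def rec_alt (word : String) : Int :=
  ((runSplit word.toList).length : Int) - 1
    + (match PySem.Str.pyGet? word (-1) with
       | some c => if c = '-' then (1 : Int) else 0
       | none => 0)  -- Python raises IndexError at word[-1]; excluded by Pre_rec

-- ===== PRECONDITION & SPEC =====
-- Pre_rec excludes only the empty string, on which both A (word[0]) and B (word[-1]) raise IndexError.
def Pre_rec (word : String) : Prop := word ≠ ""
instance (word : String) : Decidable (Pre_rec word) := by unfold Pre_rec; infer_instance
def pvWitness_rec : String := "ab-"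
def Spec_rec (word : String) (out : Int) : Prop := out = rec_alt word
instance (word : String) (out : Int) : Decidable (Spec_rec word out) := by unfold Spec_rec; infer_instance

-- ===== CLAIM (what is proved, stated in full; the proofs are below) =====
def Claim_equal_rec : Prop := ∀ (word : String), Dom_rec word → Pre_rec word → Spec_rec word (rec word)

-- ===== LEMMAS AND PROOFS =====

-- A's adjacent-change count, written as a recursion carrying the previous character.
def cntA (p : Char) : List Char → Int
  | [] => 0
  | c :: t => (if c ≠ p then 1 else 0) + cntA c t

theorem foldA (l : List Char) (e : Int) (p : Char) :
    l.foldl recStepA (e, p, p) = (e + cntA p l, l.getLastD p, l.getLastD p) := by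
  induction l generalizing e p with
  | nil => simp [cntA]
  | cons c t ih =>
    simp only [List.foldl, recStepA, ih, cntA, List.getLastD_cons]
    by_cases hc : c = p <;> simp [hc] <;> ring_nf

theorem cnt_drop (l : List Char) (p : Char) :
    cntA p l = cntA p (l.dropWhile (fun c => c == p)) := by
  induction l with
  | nil => rfl
  | cons c t ih =>
    by_cases hc : c = p
    · subst hc; simpa [cntA, List.dropWhile_cons] using ih
    · simp [hc]

theorem cnt_run : ∀ (n : ℕ) (l : List Char) (p : Char), l.length ≤ n →
    cntA p l = ((runSplit (p :: l)).length : Int) - 1 := by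
  intro n
  induction n with
  | zero =>
    intro l p hl
    have : l = [] := List.eq_nil_of_length_eq_zero (Nat.le_zero.mp hl)
    subst this; simp [runSplit, cntA]
  | succ n ih =>
    intro l p hl
    rw [cnt_drop]
    rw [runSplit]
    cases hd : l.dropWhile (fun c => c == p) with
    | nil => simp [runSplit, cntA]
    | cons c t =>
      have hcp : (c == p) = false := by
        have := List.head?_dropWhile_not (fun c => c == p) l
        rw [hd] at this; simpa using this
      have hlen : t.length ≤ n := by
        have h1 : (c :: t).length ≤ l.length := by
          rw [← hd]; exact List.length_dropWhile_le _ _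
        simp at h1; omega
      have hne : c ≠ p := by simpa using hcp
      have hc := ih t c hlen
      simp only [cntA, if_pos hne, List.length_cons]
      rw [hc]
      push_cast
      omega

theorem pyGet_last (s : String) (h : Char) (t : List Char) (hw : s.toList = h :: t) :
    PySem.Str.pyGet? s (-1) = some ((h :: t).getLast (by simp)) := by
  simp [PySem.Str.pyGet?, PySem.List.pyGet?, PySem.List.pyIdx?, hw]
  simp [List.getLast_eq_getElem]
  rfl

-- ===== VERDICT (by name: the statement is the Claim_ definition above) =====
theorem rec_spec : Claim_equal_rec := by
  intro word _ hpre
  unfold Spec_rec rec rec_alt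
  have hne : word.toList ≠ [] := by
    intro h; exact hpre (by simpa using congrArg String.ofList h)
  cases hw : word.toList with
  | nil => exact absurd hw hne
  | cons h t =>
    simp only [hw]
    rw [foldA]
    have hcnt : cntA h (h :: t) = cntA h t := by simp [cntA]
    have hrun : cntA h t = ((runSplit (h :: t)).length : Int) - 1 :=
      cnt_run t.length t h le_rfl
    have hlast := pyGet_last word h t hw
    have hgl : (h :: t).getLastD h = (h :: t).getLast (by simp) := by
      simp [List.getLastD_eq_getLast?, List.getLast?_eq_some_getLast]
    simp only [hlast, hgl, hcnt, hrun]
    split <;> simp
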